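-- pv_equiv track=rewrite | github.com/yeosang0508/dog_behavior_anallysis | scripts/behavior_analysis/video_behavior_analysis.py | detect_behavior_transitions
-- ===== SOURCE A (Python) =====
-- def detect_behavior_transitions(predictions):
--     transitions = []
--     current_behavior = predictions[0]
--     start_frame = 0
--
--     for i in range(1, len(predictions)):
--         if predictions[i] != current_behavior:
--             transitions.append((current_behavior, start_frame, i - 1))
--             current_behavior = predictions[i]
--             start_frame = i
--
--     transitions.append((current_behavior, start_frame, len(predictions) - 1))
--     return transitions
-- ===== SOURCE B (Python) =====
-- def detect_behavior_transitions(predictions):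
--     # Build runs back-to-front: walk indices from the end, merging each frame
--     # into the most recently opened run or opening a new one-frame run, then
--     # reverse the collected runs into forward order.
--     runs_rev = []
--     for idx in range(len(predictions) - 1, -1, -1):
--         label = predictions[idx]
--         if runs_rev and runs_rev[-1][0] == label:
--             runs_rev[-1] = (label, idx, runs_rev[-1][2])
--         else:
--             runs_rev.append((label, idx, idx))
--     return runs_rev[::-1]
-- ===== Notes on version B (the rewrite author's own statement) =====
-- stated objective: alternative
-- what changed: B builds the run list back-to-front, walking indices from the end and merging each frame into the most recently opened run (or opening a new one), then reverses the collected runs, instead of A's forward current_behavior/start_frame state machine with a final append.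
import Mathlib
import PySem

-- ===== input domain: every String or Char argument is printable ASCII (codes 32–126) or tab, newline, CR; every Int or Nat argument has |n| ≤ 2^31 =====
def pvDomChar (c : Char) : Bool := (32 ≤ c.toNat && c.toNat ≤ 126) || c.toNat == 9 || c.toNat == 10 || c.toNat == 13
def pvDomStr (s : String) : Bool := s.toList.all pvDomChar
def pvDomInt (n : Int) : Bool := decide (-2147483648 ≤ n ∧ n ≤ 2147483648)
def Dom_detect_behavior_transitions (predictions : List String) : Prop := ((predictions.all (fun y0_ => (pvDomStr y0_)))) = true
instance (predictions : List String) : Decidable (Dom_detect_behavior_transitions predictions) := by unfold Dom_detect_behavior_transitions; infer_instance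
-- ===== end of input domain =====

-- B builds the run list back-to-front by merging each frame into the head run; A is a forward
-- state machine.  Equivalence is proved for nonempty input; A raises IndexError on [].

-- ===== PORT A =====
-- literal port: predictions[0] (IndexError on [] → none, excluded by Pre_), then the
-- indexed for-loop as a foldl over range(1, len(predictions)) with state
-- (transitions, current_behavior, start_frame), then the final append.
def detect_behavior_transitions (predictions : List String) : List (String × Int × Int) :=
  match PySem.List.pyGet? predictions 0 with
  | none => []  -- Python raises IndexError here; outside Pre_
  | some p0 =>
    let st := (PySem.List.pyRange 1 (PySem.List.len predictions) 1).foldl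
      (fun (s : List (String × Int × Int) × String × Int) i =>
        if PySem.List.pyGetD predictions i "" ≠ s.2.1 then
          (s.1 ++ [(s.2.1, s.2.2, i - 1)], PySem.List.pyGetD predictions i "", i)
        else s)
      ([], p0, 0)
    st.1 ++ [(st.2.1, st.2.2, PySem.List.len predictions - 1)]

-- ===== PORT B =====
-- B walks indices from the end (for idx in range(len-1, -1, -1)): each frame either merges
-- into the most recently opened run (runs_rev[-1] = ...) or opens a new one-frame run
-- (runs_rev.append(...)); the collected runs are reversed into forward order at the end.
def altStepB (predictions : List String) (runs_rev : List (String × Int × Int))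
    (idx : Int) : List (String × Int × Int) :=
  let label := PySem.List.pyGetD predictions idx ""
  match runs_rev.getLast? with
  | some (l, _, e) =>
    if l == label then runs_rev.dropLast ++ [(label, idx, e)]
    else runs_rev ++ [(label, idx, idx)]
  | none => runs_rev ++ [(label, idx, idx)]

def detect_behavior_transitions_alt (predictions : List String) : List (String × Int × Int) :=
  ((PySem.List.pyRange (PySem.List.len predictions - 1) (-1) (-1)).foldl
    (altStepB predictions) []).reverse

-- ===== PRECONDITION & SPEC =====
def Pre_detect_behavior_transitions (predictions : List String) : Prop := predictions ≠ []
instance (predictions : List String) : Decidable (Pre_detect_behavior_transitions predictions) := by unfold Pre_detect_behavior_transitions; infer_instance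

def pvWitness_detect_behavior_transitions : List String := ["sit", "sit", "walk"]

def Spec_detect_behavior_transitions (predictions : List String) (out : List (String × Int × Int)) : Prop := out = detect_behavior_transitions_alt predictions
instance (predictions : List String) (out : List (String × Int × Int)) : Decidable (Spec_detect_behavior_transitions predictions out) := by unfold Spec_detect_behavior_transitions; infer_instance

-- ===== CLAIM (what is proved, stated in full; the proofs are below) =====
def Claim_equal_detect_behavior_transitions : Prop := ∀ (predictions : List String), Dom_detect_behavior_transitions predictions → Pre_detect_behavior_transitions predictions → Spec_detect_behavior_transitions predictions (detect_behavior_transitions predictions)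

-- ===== LEMMAS AND PROOFS =====

-- A's loop body, named (identical to the lambda inside the port of A)
def stepA (predictions : List String) (s : List (String × Int × Int) × String × Int)
    (i : Int) : List (String × Int × Int) × String × Int :=
  if PySem.List.pyGetD predictions i "" ≠ s.2.1 then
    (s.1 ++ [(s.2.1, s.2.2, i - 1)], PySem.List.pyGetD predictions i "", i)
  else s

-- The back-to-front run list as a structural recursion (B's loop, one index per element).
def altRuns (idx : Int) (rest : List String) : List (String × Int × Int) :=
  match rest with
  | [] => []
  | label :: tail =>
    match altRuns (idx + 1) tail with
    | (l, _, e) :: t => if l == label then (label, idx, e) :: t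
                        else (label, idx, idx) :: (l, idx + 1, e) :: t
    | [] => [(label, idx, idx)]

-- A's loop, written as a structural recursion over the suffix of the list still to scan,
-- together with A's final append (so goA acc cur start i rest = "run A's loop from index i
-- on rest = predictions.drop i, then append the final run").
def goA (acc : List (String × Int × Int)) (cur : String) (start : Int) (i : Int)
    (rest : List String) : List (String × Int × Int) :=
  match rest with
  | [] => acc ++ [(cur, start, i - 1)]
  | p :: rest' =>
    if p ≠ cur then goA (acc ++ [(cur, start, i - 1)]) p i (i + 1) rest'
    else goA acc cur start (i + 1) rest'

-- merge of a finished run (cur, start, ·) ending at index i into the back-to-front result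
def mergeRun (cur : String) (start i : Int) (ys : List (String × Int × Int)) :
    List (String × Int × Int) :=
  match ys with
  | [] => [(cur, start, i)]
  | (l, _, e) :: t => if l == cur then (cur, start, e) :: t
                      else (cur, start, i) :: (l, i + 1, e) :: t

lemma altRuns_head_start (i : Int) (rest : List String) :
    ∀ l s e t, altRuns i rest = (l, s, e) :: t → s = i := by
  intro l s e t h
  cases rest with
  | nil => simp [altRuns] at h
  | cons p rest' =>
    rw [altRuns] at h
    rcases hr : altRuns (i + 1) rest' with _ | ⟨⟨l', s', e'⟩, t'⟩ <;> rw [hr] at h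
    · simp at h; omega
    · by_cases hl : l' == p <;> simp [hl] at h <;> omega

lemma goA_eq_merge (rest : List String) :
    ∀ (acc : List (String × Int × Int)) (cur : String) (start i : Int),
      goA acc cur start (i + 1) rest = acc ++ mergeRun cur start i (altRuns (i + 1) rest) := by
  induction rest with
  | nil => intro acc cur start i; simp [goA, altRuns, mergeRun]
  | cons p rest' ih =>
    intro acc cur start i
    rw [goA, altRuns]
    by_cases hp : p = cur
    · subst hp
      rw [if_neg (by simp)]
      rw [ih acc p start (i + 1)]
      rcases hr : altRuns (i + 1 + 1) rest' with _ | ⟨⟨l, s, e⟩, t⟩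
      · simp [mergeRun]
      · by_cases hl : l == p
        · simp [mergeRun, hl]
        · simp [mergeRun, hl]
    · rw [if_pos hp, ih (acc ++ [(cur, start, i + 1 - 1)]) p (i + 1) (i + 1)]
      have hpc : (p == cur) = false := by simp [hp]
      rcases hr : altRuns (i + 1 + 1) rest' with _ | ⟨⟨l, s, e⟩, t⟩
      · simp [mergeRun, hpc]
      · by_cases hl : l == p
        · simp [mergeRun, hl, hpc]
        · simp [mergeRun, hl, hpc]

-- A's foldl over range(1, len) with pyGetD indexing equals goA on the dropped suffix.
lemma foldl_eq_goA (predictions : List String) :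
    ∀ (rest : List String) (k : Nat), predictions.drop k = rest → k ≤ predictions.length →
    ∀ (acc : List (String × Int × Int)) (cur : String) (start : Int),
      (((PySem.List.pyRange (k : Int) (PySem.List.len predictions) 1).foldl
          (stepA predictions) (acc, cur, start)).1
        ++ [(((PySem.List.pyRange (k : Int) (PySem.List.len predictions) 1).foldl
          (stepA predictions) (acc, cur, start)).2.1,
            ((PySem.List.pyRange (k : Int) (PySem.List.len predictions) 1).foldl
          (stepA predictions) (acc, cur, start)).2.2, PySem.List.len predictions - 1)])
      = goA acc cur start (k : Int) rest := by
  intro rest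
  induction rest with
  | nil =>
    intro k hdrop hk acc cur start
    have hlen : predictions.length ≤ k := by
      have := congrArg List.length hdrop; simp at this; omega
    have hkeq : k = predictions.length := le_antisymm hk hlen
    rw [PySem.List.pyRange_one_eq_nil (by simp [PySem.List.len_eq]; omega)]
    simp [goA, hkeq, PySem.List.len_eq]
  | cons p rest' ih =>
    intro k hdrop hk acc cur start
    have hklt : k < predictions.length := by
      have := congrArg List.length hdrop; simp at this; omega
    have hget : PySem.List.pyGetD predictions (k : Int) "" = p := by
      rw [PySem.List.pyGetD_natCast]
      have hsome : predictions[k]? = some p := by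
        rw [List.getElem?_eq_getElem hklt]
        have h0 : (predictions.drop k)[0]'(by simp [hdrop]) = p := by simp [hdrop]
        rw [List.getElem_drop] at h0
        simpa using h0
      simp [List.getD, hsome]
    have hdrop' : predictions.drop (k + 1) = rest' := by
      have hdd : predictions.drop (k + 1) = (predictions.drop k).drop 1 := by
        rw [List.drop_drop]
      rw [hdd, hdrop]; simp
    rw [PySem.List.pyRange_one_cons (by simp [PySem.List.len_eq]; exact_mod_cast hklt)]
    have hcast : (k : Int) + 1 = ((k + 1 : Nat) : Int) := by push_cast; ring
    simp only [List.foldl_cons]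
    by_cases hp : p = cur
    · have hstep : stepA predictions (acc, cur, start) (k : Int) = (acc, cur, start) := by
        simp [stepA, hget, hp]
      rw [hstep, hcast, ih (k + 1) hdrop' (by omega) acc cur start]
      rw [goA, if_neg (by simp [hp]), hcast]
    · have hstep : stepA predictions (acc, cur, start) (k : Int)
          = (acc ++ [(cur, start, (k : Int) - 1)], p, (k : Int)) := by
        simp [stepA, hget, hp]
      rw [hstep, hcast, ih (k + 1) hdrop' (by omega) (acc ++ [(cur, start, (k : Int) - 1)]) p (k : Int)]
      rw [goA, if_pos hp, hcast]

lemma detect_eq_goA (p0 : String) (rest : List String) :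
    detect_behavior_transitions (p0 :: rest) = goA [] p0 0 1 rest := by
  have h := foldl_eq_goA (p0 :: rest) rest 1 (by simp) (by simp) [] p0 0
  simp only [Nat.cast_one] at h
  have hs : stepA (p0 :: rest) = fun (s : List (String × Int × Int) × String × Int) (i : Int) =>
      if PySem.List.pyGetD (p0 :: rest) i "" = s.2.1 then s
      else (s.1 ++ [(s.2.1, s.2.2, i - 1)], PySem.List.pyGetD (p0 :: rest) i "", i) := by
    funext s i; simp [stepA, ite_not]
  rw [hs] at h
  simpa [detect_behavior_transitions, PySem.List.pyGet?_zero_cons] using h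

-- B's countdown foldl, read right to left, is a foldr over range(0, len); that foldr builds
-- the reverse of altRuns.
lemma foldr_eq_altRuns_reverse (predictions : List String) :
    ∀ (rest : List String) (k : Nat), predictions.drop k = rest →
      (PySem.List.pyRange (k : Int) (PySem.List.len predictions) 1).foldr
        (fun idx acc => altStepB predictions acc idx) []
      = (altRuns (k : Int) rest).reverse := by
  intro rest
  induction rest with
  | nil =>
    intro k hdrop
    have hlen : predictions.length ≤ k := by
      have := congrArg List.length hdrop; simp at this; omega
    rw [PySem.List.pyRange_one_eq_nil (by simp [PySem.List.len_eq]; omega)]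
    simp [altRuns]
  | cons p rest' ih =>
    intro k hdrop
    have hklt : k < predictions.length := by
      have := congrArg List.length hdrop; simp at this; omega
    have hget : PySem.List.pyGetD predictions (k : Int) "" = p := by
      rw [PySem.List.pyGetD_natCast]
      have hsome : predictions[k]? = some p := by
        rw [List.getElem?_eq_getElem hklt]
        have h0 : (predictions.drop k)[0]'(by simp [hdrop]) = p := by simp [hdrop]
        rw [List.getElem_drop] at h0
        simpa using h0
      simp [List.getD, hsome]
    have hdrop' : predictions.drop (k + 1) = rest' := by
      have hdd : predictions.drop (k + 1) = (predictions.drop k).drop 1 := by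
        rw [List.drop_drop]
      rw [hdd, hdrop]; simp
    rw [PySem.List.pyRange_one_cons (by simp [PySem.List.len_eq]; exact_mod_cast hklt)]
    have hcast : (k : Int) + 1 = ((k + 1 : Nat) : Int) := by push_cast; ring
    rw [List.foldr_cons, hcast, ih (k + 1) hdrop']
    rw [altRuns, ← hcast]
    rcases hr : altRuns ((k : Int) + 1) rest' with _ | ⟨⟨l, s, e⟩, t⟩
    · simp [altStepB, hget]
    · have hs : s = (k : Int) + 1 := altRuns_head_start _ _ l s e t hr
      by_cases hl : l == p
      · simp [altStepB, hget, hl]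
      · simp [altStepB, hget, hl, hs]

lemma alt_eq_altRuns (predictions : List String) :
    detect_behavior_transitions_alt predictions = altRuns 0 predictions := by
  unfold detect_behavior_transitions_alt
  have hrev : PySem.List.pyRange (PySem.List.len predictions - 1) (-1) (-1)
      = (PySem.List.pyRange 0 (PySem.List.len predictions) 1).reverse := by
    have := PySem.List.pyRange_neg_one_eq_reverse (PySem.List.len predictions - 1) (-1)
    simpa using this
  rw [hrev, List.foldl_reverse]
  have h := foldr_eq_altRuns_reverse predictions predictions 0 (by simp)
  simp only [Nat.cast_zero] at h
  rw [h, List.reverse_reverse]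

-- ===== VERDICT (by name: the statement is the Claim_ definition above) =====
theorem detect_behavior_transitions_spec : Claim_equal_detect_behavior_transitions := by
  intro predictions _ hpre
  unfold Spec_detect_behavior_transitions
  cases predictions with
  | nil => exact absurd rfl hpre
  | cons p0 rest =>
    rw [detect_eq_goA p0 rest]
    have h := goA_eq_merge rest [] p0 0 0
    simp only [zero_add, List.nil_append] at h
    rw [h]
    rw [alt_eq_altRuns, altRuns]
    simp only [zero_add]
    rcases hr : altRuns 1 rest with _ | ⟨⟨l, s, e⟩, t⟩
    · simp [mergeRun]
    · by_cases hl : l == p0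
      · simp [mergeRun, hl]
      · simp [mergeRun, hl]
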